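-- pv_equiv track=rewrite | github.com/yodamaster122/dieloli | Script/Design/map_handle.py | get_relation_map_list_for_scene_path
-- ===== SOURCE A (Python) =====
-- def get_relation_map_list_for_scene_path(scene_path: list) -> list:
--     """
--     获取场景所在所有直接地图(当前场景id为0，所在地图在上层地图相对位置也为0，视为直接地图)位置
--     Keyword arguments:
--     scene_path -- 当前场景路径
--     """
--     now_path = scene_path
--     now_map_path = scene_path[:-1]
--     now_pathId = now_path[-1]
--     map_list = []
--     if now_map_path != [] and now_map_path[:-1] != []:
--         map_list.append(now_map_path)
--         if now_pathId == "0":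
--             return map_list + get_relation_map_list_for_scene_path(
--                 now_map_path
--             )
--         else:
--             return map_list
--     else:
--         map_list.append(now_map_path)
--         return map_list
-- ===== SOURCE B (Python) =====
-- def get_relation_map_list_for_scene_path(scene_path: list) -> list:
--     """Iterative rewrite: walk up the path with an explicit loop and accumulator."""
--     result = []
--     now = scene_path
--     while True:
--         now_pathId = now[-1]
--         now_map_path = now[:-1]
--         result.append(now_map_path)
--         if len(now) >= 3 and now_pathId == "0":
--             now = now_map_path
--         else:
--             return result
-- ===== Notes on version B (the rewrite author's own statement) =====
-- stated objective: simpler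
-- what changed: Replaced the self-recursion (with list concatenation of recursive results) by an explicit while-loop with an accumulator, and the two list-emptiness slice tests by a single length check.
import Mathlib
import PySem

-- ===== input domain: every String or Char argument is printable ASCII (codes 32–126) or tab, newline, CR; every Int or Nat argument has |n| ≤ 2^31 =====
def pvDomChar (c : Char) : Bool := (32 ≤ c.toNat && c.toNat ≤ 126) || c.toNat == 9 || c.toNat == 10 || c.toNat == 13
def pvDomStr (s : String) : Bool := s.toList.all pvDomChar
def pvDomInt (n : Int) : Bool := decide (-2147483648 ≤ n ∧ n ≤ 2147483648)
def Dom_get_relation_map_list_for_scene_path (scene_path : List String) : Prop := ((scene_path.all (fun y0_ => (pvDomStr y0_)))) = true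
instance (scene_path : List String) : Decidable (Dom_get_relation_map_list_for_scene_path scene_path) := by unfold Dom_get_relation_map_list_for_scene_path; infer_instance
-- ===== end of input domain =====

-- B replaces A's self-recursion by an explicit loop with an accumulator; equivalence of the return values is proved.

-- ===== PORT A =====
-- literal port of A: recursion on the [:-1] prefix; scene_path[-1] is total only under Pre_ (nonempty list)
def get_relation_map_list_for_scene_path (scene_path : List String) : List (List String) :=
  let now_map_path := PySem.List.slice scene_path none (some (-1))
  let now_pathId := PySem.List.pyGetD scene_path (-1) ""
  if h : now_map_path ≠ [] ∧ PySem.List.slice now_map_path none (some (-1)) ≠ [] then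
    if now_pathId = "0" then
      [now_map_path] ++ get_relation_map_list_for_scene_path now_map_path
    else
      [now_map_path]
  else
    [now_map_path]
termination_by scene_path.length
decreasing_by
  have hne : scene_path ≠ [] := fun hnil => h.1 (by subst hnil; decide)
  have hpos : 0 < scene_path.length := List.length_pos_of_ne_nil hne
  simp only [PySem.List.slice_to_neg_one, List.length_dropLast]
  omega

-- ===== PORT B =====
-- the while-loop of Source B: state (now, result); same termination measure
def grml_loop (now : List String) (result : List (List String)) : List (List String) :=
  let now_map_path := PySem.List.slice now none (some (-1))
  let result' := result ++ [now_map_path]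
  if h : 3 ≤ now.length ∧ PySem.List.pyGetD now (-1) "" = "0" then
    grml_loop now_map_path result'
  else
    result'
termination_by now.length
decreasing_by
  simp only [PySem.List.slice_to_neg_one]
  simp [List.length_dropLast]
  omega

def get_relation_map_list_for_scene_path_alt (scene_path : List String) : List (List String) :=
  grml_loop scene_path []

-- ===== PRECONDITION & SPEC =====
-- Pre_ excludes the empty list, on which the Python A (and B) raise IndexError at scene_path[-1]
def Pre_get_relation_map_list_for_scene_path (scene_path : List String) : Prop := scene_path ≠ []
instance (scene_path : List String) : Decidable (Pre_get_relation_map_list_for_scene_path scene_path) := by unfold Pre_get_relation_map_list_for_scene_path; infer_instance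
def pvWitness_get_relation_map_list_for_scene_path : List String := ["1", "0"]
def Spec_get_relation_map_list_for_scene_path (scene_path : List String) (out : List (List String)) : Prop := out = get_relation_map_list_for_scene_path_alt scene_path
instance (scene_path : List String) (out : List (List String)) : Decidable (Spec_get_relation_map_list_for_scene_path scene_path out) := by unfold Spec_get_relation_map_list_for_scene_path; infer_instance

-- ===== CLAIM (what is proved, stated in full; the proofs are below) =====
def Claim_equal_get_relation_map_list_for_scene_path : Prop := ∀ (scene_path : List String), Dom_get_relation_map_list_for_scene_path scene_path → Pre_get_relation_map_list_for_scene_path scene_path → Spec_get_relation_map_list_for_scene_path scene_path (get_relation_map_list_for_scene_path scene_path)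

-- ===== LEMMAS AND PROOFS =====

-- B's guard (length ≥ 3) coincides with A's (both slice prefixes nonempty)
lemma grml_guard_iff (now : List String) :
    (PySem.List.slice now none (some (-1)) ≠ [] ∧
     PySem.List.slice (PySem.List.slice now none (some (-1))) none (some (-1)) ≠ []) ↔ 3 ≤ now.length := by
  simp only [PySem.List.slice_to_neg_one, ne_eq, ← List.length_eq_zero_iff, List.length_dropLast]
  omega

-- loop invariant: the loop prepends its accumulator to A's recursive result
lemma grml_loop_eq (now : List String) (acc : List (List String)) :
    grml_loop now acc = acc ++ get_relation_map_list_for_scene_path now := by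
  rw [grml_loop.eq_def, get_relation_map_list_for_scene_path.eq_def]
  simp only []
  by_cases h3 : 3 ≤ now.length
  · by_cases h0 : PySem.List.pyGetD now (-1) "" = "0"
    · rw [dif_pos ⟨h3, h0⟩, dif_pos ((grml_guard_iff now).mpr h3), if_pos h0,
        grml_loop_eq (PySem.List.slice now none (some (-1)))]
      simp
    · rw [dif_neg (by tauto), dif_pos ((grml_guard_iff now).mpr h3), if_neg h0]
  · rw [dif_neg (by tauto), dif_neg (fun h => h3 ((grml_guard_iff now).mp h))]
termination_by now.length
decreasing_by
  simp only [PySem.List.slice_to_neg_one]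
  simp [List.length_dropLast]
  omega

-- ===== VERDICT (by name: the statement is the Claim_ definition above) =====
theorem get_relation_map_list_for_scene_path_spec : Claim_equal_get_relation_map_list_for_scene_path := by
  intro scene_path _ _
  unfold Spec_get_relation_map_list_for_scene_path get_relation_map_list_for_scene_path_alt
  rw [grml_loop_eq]
  simp
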